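-- pv_equiv track=rewrite | github.com/silveranon323/PYTHON-UDEMY | 04_loops/coding_exercises/parcel_scanning_systems.py | scan_parcels
-- ===== SOURCE A (Python) =====
-- def scan_parcels(parcel_codes: list[str]) -> list[str]:
--     # Write your code below this line
--     log=[]
--     for barcode in parcel_codes:
--         if barcode=="DAMAGED":
--             log.append("Skipped damaged parcel")
--             continue
--         if barcode=="STOP":
--             log.append("Critical error: Stopping scan")
--             break
--         log.append(f"Scanned parcel: {barcode}")
--     else:
--         log.append("All parcels scanned successfully" )
--     return log
--     pass
-- ===== SOURCE B (Python) =====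
-- def scan_parcels(parcel_codes: list[str]) -> list[str]:
--     try:
--         stop_idx = parcel_codes.index("STOP")
--         found = True
--     except ValueError:
--         stop_idx = len(parcel_codes)
--         found = False
--     log = ["Skipped damaged parcel" if b == "DAMAGED" else f"Scanned parcel: {b}"
--            for b in parcel_codes[:stop_idx]]
--     log.append("Critical error: Stopping scan" if found else "All parcels scanned successfully")
--     return log
-- ===== Notes on version B (the rewrite author's own statement) =====
-- stated objective: idiomatic
-- what changed: Replaces the break-driven for-else loop with an index-first decomposition: find the first 'STOP' via list.index, map the prefix before it with a comprehension, then append the terminal line.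
import Mathlib
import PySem

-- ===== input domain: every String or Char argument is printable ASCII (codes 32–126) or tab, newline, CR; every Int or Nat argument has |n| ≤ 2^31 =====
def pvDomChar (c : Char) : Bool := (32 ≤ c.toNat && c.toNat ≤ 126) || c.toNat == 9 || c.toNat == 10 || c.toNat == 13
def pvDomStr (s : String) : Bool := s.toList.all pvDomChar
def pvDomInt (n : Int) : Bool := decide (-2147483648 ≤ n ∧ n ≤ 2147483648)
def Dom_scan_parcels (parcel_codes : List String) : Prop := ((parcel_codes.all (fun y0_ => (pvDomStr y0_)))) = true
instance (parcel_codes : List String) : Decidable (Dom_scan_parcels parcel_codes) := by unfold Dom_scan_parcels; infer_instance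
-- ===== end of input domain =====

-- B replaces A's break-driven for-else loop with an index-first decomposition (find 'STOP', map the prefix, append the terminal line); objective: idiomatic.

-- ===== PORT A =====
-- A's for-loop with break/else, carrying the accumulated log.
def scan_parcels_go (codes : List String) (log : List String) : List String :=
  match codes with
  | [] => log ++ ["All parcels scanned successfully"]
  | barcode :: rest =>
    if barcode = "DAMAGED" then scan_parcels_go rest (log ++ ["Skipped damaged parcel"])
    else if barcode = "STOP" then log ++ ["Critical error: Stopping scan"]
    else scan_parcels_go rest (log ++ ["Scanned parcel: " ++ barcode])

def scan_parcels (parcel_codes : List String) : List String :=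
  scan_parcels_go parcel_codes []

-- ===== PORT B =====
def scan_parcels_alt (parcel_codes : List String) : List String :=
  let p :=
    match PySem.List.index? parcel_codes "STOP" with
    | some i => (i, true)
    | none => (parcel_codes.length, false)
  let log := (PySem.List.slice parcel_codes none (some (p.1 : Int))).map
    (fun b => if b = "DAMAGED" then "Skipped damaged parcel" else "Scanned parcel: " ++ b)
  log ++ [if p.2 then "Critical error: Stopping scan" else "All parcels scanned successfully"]

-- ===== PRECONDITION & SPEC =====
def Spec_scan_parcels (parcel_codes : List String) (out : List String) : Prop := out = scan_parcels_alt parcel_codes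
instance (parcel_codes : List String) (out : List String) : Decidable (Spec_scan_parcels parcel_codes out) := by unfold Spec_scan_parcels; infer_instance

-- ===== CLAIM (what is proved, stated in full; the proofs are below) =====
def Claim_equal_scan_parcels : Prop := ∀ (parcel_codes : List String), Dom_scan_parcels parcel_codes → Spec_scan_parcels parcel_codes (scan_parcels parcel_codes)

-- ===== LEMMAS AND PROOFS =====
lemma scan_parcels_alt_nil : scan_parcels_alt [] = ["All parcels scanned successfully"] := by
  decide

lemma scan_parcels_alt_stop (rest : List String) :
    scan_parcels_alt ("STOP" :: rest) = ["Critical error: Stopping scan"] := by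
  have h0 : PySem.List.slice ("STOP" :: rest) none (some ((0 : Nat) : Int))
      = ("STOP" :: rest).take 0 := PySem.List.slice_to_natCast _ 0
  simp [scan_parcels_alt, PySem.List.index?_eq_idxOf?, List.idxOf?_cons]
  exact_mod_cast h0

lemma scan_parcels_alt_cons (b : String) (rest : List String) (hb : b ≠ "STOP") :
    scan_parcels_alt (b :: rest) =
      (if b = "DAMAGED" then "Skipped damaged parcel" else "Scanned parcel: " ++ b)
        :: scan_parcels_alt rest := by
  simp only [scan_parcels_alt, PySem.List.index?_eq_idxOf?, List.idxOf?_cons,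
    beq_iff_eq, hb, if_false]
  rcases Option.eq_none_or_eq_some (List.idxOf? "STOP" rest) with h | ⟨i, h⟩
  all_goals simp only [h, Option.map_none, Option.map_some]
  case inl =>
      have h1 : PySem.List.slice (b :: rest) none (some ((rest.length + 1 : Nat) : Int))
          = (b :: rest).take (rest.length + 1) := by
        exact_mod_cast PySem.List.slice_to_natCast (b :: rest) (rest.length + 1)
      have h2 : PySem.List.slice rest none (some ((rest.length : Nat) : Int))
          = rest.take rest.length := PySem.List.slice_to_natCast rest rest.length
      push_cast at h1
      simp [h1, h2]
  case inr =>
      have h1 : PySem.List.slice (b :: rest) none (some ((i + 1 : Nat) : Int))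
          = (b :: rest).take (i + 1) := by
        exact_mod_cast PySem.List.slice_to_natCast (b :: rest) (i + 1)
      have h2 : PySem.List.slice rest none (some ((i : Nat) : Int))
          = rest.take i := PySem.List.slice_to_natCast rest i
      push_cast at h1
      simp [h1, h2]

lemma scan_parcels_go_eq (codes : List String) :
    ∀ log : List String, scan_parcels_go codes log = log ++ scan_parcels_alt codes := by
  induction codes with
  | nil => intro log; simp [scan_parcels_go, scan_parcels_alt_nil]
  | cons b rest ih =>
      intro log
      by_cases hstop : b = "STOP"
      · subst hstop
        simp [scan_parcels_go, scan_parcels_alt_stop]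
      · rw [scan_parcels_alt_cons b rest hstop]
        by_cases hdam : b = "DAMAGED"
        · subst hdam
          simp [scan_parcels_go, ih]
        · simp [scan_parcels_go, hdam, hstop, ih]

-- ===== VERDICT (by name: the statement is the Claim_ definition above) =====
theorem scan_parcels_spec : Claim_equal_scan_parcels := by
  intro parcel_codes _
  unfold Spec_scan_parcels scan_parcels
  simpa using scan_parcels_go_eq parcel_codes []
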